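-- pv_equiv track=rewrite | github.com/joypciu/bet365_site_data_collection_test | using_patchright (works).py | parse_bet365_format
-- ===== SOURCE A (Python) =====
-- def parse_bet365_format(text):
--     # Simple parser for Bet365's pipe-delimited format
--     matches = []
--     current_match = {}
--     segments = text.split('|')
--     for segment in segments:
--         if not segment:
--             continue
--         fields = segment.split(';')
--         for field in fields:
--             if '=' in field:
--                 key, value = field.split('=', 1)
--                 if key == 'EV' or key == 'MA':  # Start of match or market
--                     if current_match:
--                         matches.append(current_match)
--                     current_match = {}
--                 current_match[key] = value
--             elif field:  # Possible type like 'MA' or 'PA'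
--                 if current_match:
--                     matches.append(current_match)
--                 current_match = {'type': field}
--     if current_match:
--         matches.append(current_match)
--     return matches
-- ===== SOURCE B (Python) =====
-- def _starts_match(tok):
--     key, sep, _ = tok.partition('=')
--     return key in ('EV', 'MA') if sep else True
--
-- def _chunks(tokens):
--     # recursively cut the token list into groups, each opened by a boundary token
--     if not tokens:
--         return []
--     body = tokens[1:]
--     i = 0
--     while i < len(body) and not _starts_match(body[i]):
--         i += 1
--     return [tokens[:i + 1]] + _chunks(body[i:])
--
-- def _build(group):
--     d = {}
--     for tok in group:
--         key, sep, value = tok.partition('=')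
--         if sep:
--             d[key] = value
--         else:
--             d['type'] = tok
--     return d
--
-- def parse_bet365_format(text):
--     # Staged passes: flatten to nonempty tokens, cut into groups, build each dict independently.
--     tokens = [f for seg in text.split('|') for f in seg.split(';') if f]
--     return [_build(g) for g in _chunks(tokens)]
-- ===== Notes on version B (the rewrite author's own statement) =====
-- stated objective: alternative
-- what changed: Replaces A's single-pass mutable state machine (current dict + flush-on-boundary) by staged passes: flatten to a nonempty-token list, recursively cut it into groups at boundary tokens, then build each match dict independently from its group.
import Mathlib
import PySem

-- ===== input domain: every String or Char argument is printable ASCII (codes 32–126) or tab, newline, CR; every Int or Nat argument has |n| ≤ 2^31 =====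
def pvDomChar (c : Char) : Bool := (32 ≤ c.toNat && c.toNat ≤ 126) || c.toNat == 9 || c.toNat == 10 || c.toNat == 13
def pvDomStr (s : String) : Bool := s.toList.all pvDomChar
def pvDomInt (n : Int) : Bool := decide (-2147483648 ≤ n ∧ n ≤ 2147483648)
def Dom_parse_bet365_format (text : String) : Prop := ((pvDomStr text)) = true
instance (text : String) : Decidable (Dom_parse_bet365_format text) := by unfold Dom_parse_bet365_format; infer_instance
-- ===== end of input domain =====

-- B replaces A's single-pass mutable state machine by staged passes: flatten to nonempty tokens,
-- recursively cut into groups at boundary tokens, then build each match dict independently.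

-- ===== PORT A =====
-- the body of A's inner `for field in fields` loop
def pvAStepField (st : List (List (String × String)) × PySem.Dict String String) (field : List Char) :
    List (List (String × String)) × PySem.Dict String String :=
  if PySem.Chars.isIn ['='] field then
    let parts := PySem.Chars.splitOnMax field ['='] 1
    let key := String.mk (parts.headD [])
    let value := String.mk (parts.getD 1 [])
    let st1 := if key = "EV" ∨ key = "MA" then
        ((if st.2.items = [] then st.1 else st.1 ++ [st.2.items]), PySem.Dict.empty)
      else st
    (st1.1, st1.2.insert key value)
  else if field ≠ [] then
    ((if st.2.items = [] then st.1 else st.1 ++ [st.2.items]),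
     (PySem.Dict.empty : PySem.Dict String String).insert "type" (String.mk field))
  else st

def parse_bet365_format (text : String) : List (List (String × String)) :=
  let segments := PySem.Chars.splitOn text.toList ['|']
  let st := segments.foldl (fun st segment =>
      if segment = [] then st
      else (PySem.Chars.splitOn segment [';']).foldl pvAStepField st)
    ([], PySem.Dict.empty)
  if st.2.items = [] then st.1 else st.1 ++ [st.2.items]

-- ===== PORT B =====
-- hand port of str.partition('='): exact — splits at the FIRST '=', the Bool says whether one was found
def pvPartEq : List Char → List Char × Bool × List Char
  | [] => ([], false, [])
  | c :: rest =>
    if c = '=' then ([], true, rest)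
    else
      let r := pvPartEq rest
      (c :: r.1, r.2.1, r.2.2)

-- Source B's _starts_match
def pvStartsMatch (tok : List Char) : Bool :=
  let r := pvPartEq tok
  if r.2.1 then decide (String.mk r.1 = "EV" ∨ String.mk r.1 = "MA") else true

-- Source B's _chunks: the while loop that finds the next boundary is the takeWhile/dropWhile split of the tail
def pvChunks : List (List Char) → List (List (List Char))
  | [] => []
  | t :: body =>
    (t :: body.takeWhile (fun tok => !pvStartsMatch tok))
      :: pvChunks (body.dropWhile (fun tok => !pvStartsMatch tok))
termination_by toks => toks.length
decreasing_by
  simpa using Nat.lt_succ_of_le (List.length_dropWhile_le _ _)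

-- the body of Source B's _build loop
def pvAssign (d : PySem.Dict String String) (tok : List Char) : PySem.Dict String String :=
  let r := pvPartEq tok
  if r.2.1 then d.insert (String.mk r.1) (String.mk r.2.2)
  else d.insert "type" (String.mk tok)

def parse_bet365_format_alt (text : String) : List (List (String × String)) :=
  let tokens := ((PySem.Chars.splitOn text.toList ['|']).flatMap
      (fun seg => PySem.Chars.splitOn seg [';'])).filter (fun f => decide (f ≠ []))
  (pvChunks tokens).map (fun g => (g.foldl pvAssign PySem.Dict.empty).items)

-- ===== PRECONDITION & SPEC =====
def Spec_parse_bet365_format (text : String) (out : List (List (String × String))) : Prop := out = parse_bet365_format_alt text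
instance (text : String) (out : List (List (String × String))) : Decidable (Spec_parse_bet365_format text out) := by unfold Spec_parse_bet365_format; infer_instance

-- ===== CLAIM (what is proved, stated in full; the proofs are below) =====
def Claim_equal_parse_bet365_format : Prop := ∀ (text : String), Dom_parse_bet365_format text → Spec_parse_bet365_format text (parse_bet365_format text)

-- ===== LEMMAS AND PROOFS =====

-- A's final flush, as a function of the loop state
def pvFin (st : List (List (String × String)) × PySem.Dict String String) : List (List (String × String)) :=
  if st.2.items = [] then st.1 else st.1 ++ [st.2.items]

-- Source B's per-group dict, as used by the B port
def pvBuild (g : List (List Char)) : List (String × String) :=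
  (g.foldl pvAssign PySem.Dict.empty).items

theorem partEq_mem (tok : List Char) : (pvPartEq tok).2.1 = true ↔ '=' ∈ tok := by
  induction tok with
  | nil => simp [pvPartEq]
  | cons c t ih =>
    by_cases hc : c = '='
    · subst hc; simp [pvPartEq]
    · simp [pvPartEq, hc, ih, Ne.symm hc]

theorem splitOnMax_go_zero :
    ∀ (f : Nat) (l cur : List Char) (acc : List (List Char)),
      PySem.Chars.splitOnMax.go ['='] f 0 l cur acc = acc.reverse ++ [cur.reverse ++ l] := by
  intro f l cur acc
  cases f with
  | zero => rw [PySem.Chars.splitOnMax.go]; simp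
  | succ g =>
    cases l with
    | nil => rw [PySem.Chars.splitOnMax.go]; simp; omega
    | cons c t => rw [PySem.Chars.splitOnMax.go]; simp

theorem splitOnMax_go_one :
    ∀ (f : Nat) (l : List Char), l.length ≤ f → ∀ (cur : List Char) (acc : List (List Char)),
      PySem.Chars.splitOnMax.go ['='] f 1 l cur acc
        = acc.reverse ++ (cur.reverse ++ (pvPartEq l).1)
            :: (if (pvPartEq l).2.1 then [(pvPartEq l).2.2] else []) := by
  intro f
  induction f with
  | zero =>
    intro l hl cur acc
    simp only [Nat.le_zero, List.length_eq_zero_iff] at hl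
    subst hl
    rw [PySem.Chars.splitOnMax.go]
    simp [pvPartEq]
  | succ g ih =>
    intro l hl cur acc
    cases l with
    | nil => rw [PySem.Chars.splitOnMax.go]; simp [pvPartEq]; omega
    | cons c t =>
      rw [PySem.Chars.splitOnMax.go]
      simp only [List.isPrefixOf, Bool.and_true, one_ne_zero]
      by_cases hc : ('=' : Char) = c
      · subst hc
        simp only [BEq.rfl, if_pos, List.length_singleton, List.drop_succ_cons, List.drop_zero]
        rw [splitOnMax_go_zero]
        simp [pvPartEq]
      · have hbe : (('=' : Char) == c) = false := by simpa using hc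
        have hcd : ¬ (c = '=') := fun h => hc h.symm
        simp only [hbe, Bool.false_eq_true, if_neg, not_false_iff]
        rw [ih t (by simpa using hl)]
        simp [pvPartEq, hcd]

theorem splitOnMax_one (tok : List Char) :
    PySem.Chars.splitOnMax tok ['='] 1
      = (pvPartEq tok).1 :: (if (pvPartEq tok).2.1 then [(pvPartEq tok).2.2] else []) := by
  rw [PySem.Chars.splitOnMax]
  norm_num
  rw [splitOnMax_go_one (tok.length + 1) tok (Nat.le_succ _)]
  simp

theorem isIn_eq_partEq (tok : List Char) :
    PySem.Chars.isIn ['='] tok = (pvPartEq tok).2.1 := by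
  rw [Bool.eq_iff_iff, PySem.Chars.isIn_iff_infix, List.singleton_infix_iff, partEq_mem]

-- A's step skips an empty field
theorem stepA_nil (st) : pvAStepField st [] = st := by
  simp [pvAStepField, isIn_eq_partEq, pvPartEq]

-- A's step on a non-boundary token is B's assignment, keeping matches
theorem stepA_of_not_starts (st) (tok : List Char) (h : pvStartsMatch tok = false) :
    pvAStepField st tok = (st.1, pvAssign st.2 tok) := by
  simp only [pvStartsMatch] at h
  simp only [pvAStepField, pvAssign]
  rw [isIn_eq_partEq, splitOnMax_one]
  cases heq : (pvPartEq tok).2.1 with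
  | false => simp [heq] at h
  | true =>
    simp only [heq] at h ⊢
    simp only [if_pos, List.headD_cons, List.getD_cons_succ, List.getD_cons_zero]
    have hk : ¬ (String.mk (pvPartEq tok).1 = "EV" ∨ String.mk (pvPartEq tok).1 = "MA") := by
      simpa using h
    simp [hk]

-- A's step on any nonempty token from an EMPTY current dict is B's assignment into the empty dict
theorem stepA_empty (ms) (tok : List Char) (h : tok ≠ []) :
    pvAStepField (ms, PySem.Dict.empty) tok = (ms, pvAssign PySem.Dict.empty tok) := by
  simp only [pvAStepField, pvAssign]
  rw [isIn_eq_partEq, splitOnMax_one]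
  have hemp : (PySem.Dict.empty : PySem.Dict String String).items = [] := rfl
  cases heq : (pvPartEq tok).2.1 with
  | true =>
    simp only [if_pos, List.headD_cons, List.getD_cons_succ, List.getD_cons_zero]
    split_ifs <;> simp
  | false => simp [h, hemp]

-- A's step on a boundary token flushes and restarts with B's assignment into the empty dict
theorem stepA_starts (ms d) (tok : List Char) (h : pvStartsMatch tok = true) (hne : tok ≠ []) :
    pvAStepField (ms, d) tok
      = ((if d.items = [] then ms else ms ++ [d.items]), pvAssign PySem.Dict.empty tok) := by
  simp only [pvStartsMatch] at h
  simp only [pvAStepField, pvAssign]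
  rw [isIn_eq_partEq, splitOnMax_one]
  cases heq : (pvPartEq tok).2.1 with
  | true =>
    simp only [heq] at h ⊢
    have hk : String.mk (pvPartEq tok).1 = "EV" ∨ String.mk (pvPartEq tok).1 = "MA" := by
      simpa using h
    simp [hk]
  | false => simp [hne]

theorem insert_items_ne_nil (d : PySem.Dict String String) (k v : String) :
    (d.insert k v).items ≠ [] := by
  by_cases h : d.contains k = true
  · rw [PySem.Dict.items_insert_of_contains (h := h)]
    intro he
    have h2 := (PySem.Dict.contains_iff_mem_keys d k).mp h
    simp_all [PySem.Dict.keys]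
  · rw [PySem.Dict.items_insert_of_not_contains (h := by simpa using h)]
    simp

theorem assign_items_ne_nil (d : PySem.Dict String String) (tok : List Char) :
    (pvAssign d tok).items ≠ [] := by
  simp only [pvAssign]
  split_ifs <;> exact insert_items_ne_nil _ _ _

theorem foldl_assign_items_ne_nil (g : List (List Char)) (d : PySem.Dict String String)
    (h : d.items ≠ []) : (g.foldl pvAssign d).items ≠ [] := by
  induction g generalizing d with
  | nil => exact h
  | cons t rest ih => exact ih _ (assign_items_ne_nil d t)

-- folding A's step over non-boundary tokens only assigns into the current dict
theorem foldl_stepA_not_starts (pre : List (List Char)) (h : ∀ x ∈ pre, pvStartsMatch x = false)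
    (st) : pre.foldl pvAStepField st = (st.1, pre.foldl pvAssign st.2) := by
  induction pre generalizing st with
  | nil => simp
  | cons t rest ih =>
    rw [List.foldl_cons, List.foldl_cons,
      stepA_of_not_starts st t (h t (List.mem_cons_self)),
      ih (fun x hx => h x (List.mem_cons_of_mem _ hx))]

-- a nonempty current dict can be flushed before processing the remaining tokens,
-- provided those start with a boundary token (or are exhausted)
theorem fin_flush (post : List (List Char)) (ms d)
    (hd : d.items ≠ [])
    (hh : post = [] ∨ ∃ b rest, post = b :: rest ∧ pvStartsMatch b = true ∧ b ≠ []) :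
    pvFin (post.foldl pvAStepField (ms, d))
      = pvFin (post.foldl pvAStepField (ms ++ [d.items], PySem.Dict.empty)) := by
  rcases hh with h | ⟨b, rest, hbr, hb, hbne⟩
  · subst h
    simp [pvFin, hd, PySem.Dict.empty]
  · subst hbr
    rw [List.foldl_cons, List.foldl_cons, stepA_starts ms d b hb hbne,
      stepA_starts (ms ++ [d.items]) PySem.Dict.empty b hb hbne]
    simp [hd, PySem.Dict.empty]

-- head of the dropWhile suffix fails the takeWhile predicate
theorem dropWhile_head_starts (body : List (List Char)) (b rest)
    (h : List.dropWhile (fun tok => !pvStartsMatch tok) body = b :: rest) :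
    pvStartsMatch b = true := by
  have hne : List.dropWhile (fun tok => !pvStartsMatch tok) body ≠ [] := by simp [h]
  have := List.head_dropWhile_not (p := fun tok => !pvStartsMatch tok) hne
  simp only [h, List.head_cons, Bool.not_eq_false'] at this
  exact this

-- MAIN INVARIANT: starting from an empty current dict, A's token loop produces
-- exactly the builds of B's chunks, appended to the matches accumulated so far
theorem pvMain : ∀ (n : Nat) (toks : List (List Char)), toks.length ≤ n →
    (∀ t ∈ toks, t ≠ []) → ∀ ms,
    pvFin (toks.foldl pvAStepField (ms, PySem.Dict.empty))
      = ms ++ (pvChunks toks).map pvBuild := by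
  intro n
  induction n with
  | zero =>
    intro toks hl _ ms
    simp only [Nat.le_zero, List.length_eq_zero_iff] at hl
    subst hl
    simp [pvChunks, pvFin, PySem.Dict.empty]
  | succ n ih =>
    intro toks hl hne ms
    cases toks with
    | nil => simp [pvChunks, pvFin, PySem.Dict.empty]
    | cons t body =>
      have hsplit := List.takeWhile_append_dropWhile
        (p := fun tok => !pvStartsMatch tok) (l := body)
      set pre := List.takeWhile (fun tok => !pvStartsMatch tok) body with hpre
      set post := List.dropWhile (fun tok => !pvStartsMatch tok) body with hpost
      have hfold : (t :: body).foldl pvAStepField (ms, PySem.Dict.empty)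
          = post.foldl pvAStepField
              (pre.foldl pvAStepField (pvAStepField (ms, PySem.Dict.empty) t)) := by
        rw [List.foldl_cons, ← List.foldl_append, hsplit]
      have hstep := stepA_empty ms t (hne t List.mem_cons_self)
      have hpremem : ∀ x ∈ pre, pvStartsMatch x = false := by
        intro x hx
        have := List.mem_takeWhile_imp hx
        simpa using this
      have hd : (pre.foldl pvAssign (pvAssign PySem.Dict.empty t)).items ≠ [] :=
        foldl_assign_items_ne_nil _ _ (assign_items_ne_nil _ _)
      rw [hfold, hstep, foldl_stepA_not_starts pre hpremem]
      have hpostmem : ∀ x ∈ post, x ∈ body := fun x hx =>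
        (List.dropWhile_sublist (fun tok => !pvStartsMatch tok)).subset hx
      have hh : post = [] ∨ ∃ b rest, post = b :: rest ∧ pvStartsMatch b = true ∧ b ≠ [] := by
        cases hp : post with
        | nil => exact Or.inl rfl
        | cons b rest =>
          refine Or.inr ⟨b, rest, rfl, dropWhile_head_starts body b rest (hpost ▸ hp), ?_⟩
          exact hne b (List.mem_cons_of_mem _ (hpostmem b (hp ▸ List.mem_cons_self)))
      rw [fin_flush post ms _ hd hh]
      have hlen : post.length ≤ n := by
        have h1 : post.length ≤ body.length := List.length_dropWhile_le _ _
        have h2 : body.length ≤ n := by simpa using Nat.le_of_succ_le_succ hl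
        omega
      rw [ih post hlen (fun x hx => hne x (List.mem_cons_of_mem _ (hpostmem x hx)))]
      show ms ++ [(pvAssign PySem.Dict.empty t |> pre.foldl pvAssign).items]
            ++ (pvChunks post).map pvBuild = _
      rw [pvChunks]
      simp only [List.map_cons, ← hpre, ← hpost, List.append_assoc, List.singleton_append]
      rfl

-- dropping empty tokens does not change A's fold (A skips them in both branches)
theorem foldl_stepA_filter_ne (toks : List (List Char)) (st) :
    toks.foldl pvAStepField st
      = (toks.filter (fun f => decide (f ≠ []))).foldl pvAStepField st := by
  induction toks generalizing st with
  | nil => rfl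
  | cons t rest ih =>
    by_cases h : t = []
    · subst h
      rw [List.foldl_cons, stepA_nil]
      simpa using ih st
    · rw [List.foldl_cons, List.filter_cons_of_pos (by simpa using h), List.foldl_cons]
      exact ih _

-- ===== VERDICT (by name: the statement is the Claim_ definition above) =====
theorem parse_bet365_format_spec : Claim_equal_parse_bet365_format := by
  intro text _
  unfold Spec_parse_bet365_format
  simp only [parse_bet365_format, parse_bet365_format_alt]
  have hfun : (fun (st : List (List (String × String)) × PySem.Dict String String) segment =>
        if segment = ([] : List Char) then st
        else (PySem.Chars.splitOn segment [';']).foldl pvAStepField st)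
      = (fun st seg => (PySem.Chars.splitOn seg [';']).foldl pvAStepField st) := by
    funext st seg
    by_cases h : seg = []
    · subst h
      have hsp : PySem.Chars.splitOn ([] : List Char) [';'] = [[]] := by decide
      simp [hsp, stepA_nil]
    · simp [h]
  rw [hfun, ← List.foldl_flatMap]
  set flat := (PySem.Chars.splitOn text.toList ['|']).flatMap
      (fun seg => PySem.Chars.splitOn seg [';']) with hflat
  rw [foldl_stepA_filter_ne]
  have := pvMain (flat.filter (fun f => decide (f ≠ []))).length
    (flat.filter (fun f => decide (f ≠ []))) le_rfl
    (fun t ht => by simpa using List.of_mem_filter ht) []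
  simpa [pvFin, pvBuild] using this
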